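-- pv_equiv track=rewrite | github.com/stone-braker/scriptingWorksets | Week_8/testWo.py | getFourCoord
-- ===== SOURCE A (Python) =====
-- def getFourCoord(fileVar, x, y):
--     if fileVar[x][y] == '@':
--         fileVar[x][y] = '-'
--         if x == 0 and y == 0:
--             return 1 + getFourCoord(fileVar, x, 9) + getFourCoord(fileVar, x, y + 1) + getFourCoord(fileVar, 9, y) + getFourCoord(fileVar, x + 1, y)
--         elif x == 0 and y == 9:
--             return 1 + getFourCoord(fileVar, x, y - 1) + getFourCoord(fileVar, x, 0) + getFourCoord(fileVar, 9, y) + getFourCoord(fileVar, x + 1, y)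
--         elif x == 9 and y == 0:
--             return 1 + getFourCoord(fileVar, x, 9) + getFourCoord(fileVar, x, y + 1) + getFourCoord(fileVar, x - 1, y) + getFourCoord(fileVar, 0, y)
--         elif x == 9 and y == 9:
--             return 1 + getFourCoord(fileVar, x, y - 1) + getFourCoord(fileVar, x, 0) + getFourCoord(fileVar, x - 1, y) + getFourCoord(fileVar, 0, y)
--         elif x == 0 and y != 0 and y != 9:
--             return 1 + getFourCoord(fileVar, x, y - 1) + getFourCoord(fileVar, x, y + 1) + getFourCoord(fileVar, 9, y) + getFourCoord(fileVar, x + 1, y)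
--         elif x == 9 and y != 0 and y != 9:
--             return 1 + getFourCoord(fileVar, x, y - 1) + getFourCoord(fileVar, x, y + 1) + getFourCoord(fileVar, x - 1, y) + getFourCoord(fileVar, 0, y)
--         elif y == 0 and x != 0 and x != 9:
--             return 1 + getFourCoord(fileVar, x, 9) + getFourCoord(fileVar, x, y + 1) + getFourCoord(fileVar, x - 1, y) + getFourCoord(fileVar, x + 1, y)
--         elif y == 9 and x != 0 and x != 9:
--             return 1 + getFourCoord(fileVar, x, y - 1) + getFourCoord(fileVar, x, 0) + getFourCoord(fileVar, x - 1, y) + getFourCoord(fileVar, x + 1, y)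
--         else:
--             return 1 + getFourCoord(fileVar, x, y - 1) + getFourCoord(fileVar, x, y + 1) + getFourCoord(fileVar, x - 1, y) + getFourCoord(fileVar, x + 1, y)
--     else:
--         return 0
-- ===== SOURCE B (Python) =====
-- def getFourCoord(fileVar, x, y):
--     count = 0
--     stack = [(x, y)]
--     while stack:
--         cx, cy = stack.pop()
--         if fileVar[cx][cy] == '@':
--             fileVar[cx][cy] = '-'
--             count += 1
--             stack.append(((cx + 1) % 10, cy))
--             stack.append(((cx - 1) % 10, cy))
--             stack.append((cx, (cy + 1) % 10))
--             stack.append((cx, (cy - 1) % 10))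
--     return count
-- ===== Notes on version B (the rewrite author's own statement) =====
-- stated objective: simpler
-- what changed: Replaces A's self-recursion with nine hardcoded boundary branches by a single while-loop flood fill over an explicit stack, computing the four torus neighbors uniformly with %10 arithmetic.
-- outside the precondition, e.g. on getFourCoord([['-', '-', '-'], ['-', '@', '-'], ['-', '-', '-']], 1, 1): A returns 1, B returns 1; on getFourCoord([['-', '-', '-'], ['-', '-', '-'], ['-', '@', '-']], -1, 1): A returns 1, B raises IndexError
import Mathlib
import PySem

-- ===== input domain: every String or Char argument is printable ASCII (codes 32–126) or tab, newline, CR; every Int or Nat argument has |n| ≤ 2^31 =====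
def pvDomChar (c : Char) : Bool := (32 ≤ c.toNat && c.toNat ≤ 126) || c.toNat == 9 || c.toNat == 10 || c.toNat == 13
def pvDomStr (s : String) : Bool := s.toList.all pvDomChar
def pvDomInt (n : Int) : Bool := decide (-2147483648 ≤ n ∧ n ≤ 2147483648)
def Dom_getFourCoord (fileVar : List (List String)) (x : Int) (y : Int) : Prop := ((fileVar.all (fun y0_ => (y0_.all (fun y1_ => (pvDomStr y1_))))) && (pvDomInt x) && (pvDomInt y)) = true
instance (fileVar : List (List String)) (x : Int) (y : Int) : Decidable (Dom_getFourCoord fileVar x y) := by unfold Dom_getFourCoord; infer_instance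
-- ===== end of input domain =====

-- B replaces A's deep recursion with nine hardcoded wraparound branches by a single explicit-stack loop
-- with %10 neighbor arithmetic (objective: simpler). Both Pythons mutate fileVar identically ('@' → '-');
-- the equivalence proved here is about the RETURN value.


-- ===== PORT A =====
-- shared helpers: cell read fileVar[x][y] and write fileVar[x][y] = '-'
-- (exact for the in-range indices guaranteed by Pre_; the grid is threaded through
--  the recursion because the Python mutates fileVar in place)
def pvCellGet (g : List (List String)) (x y : Int) : String :=
  PySem.List.pyGetD (PySem.List.pyGetD g x []) y ""

def pvCellSet (g : List (List String)) (x y : Int) : List (List String) :=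
  PySem.List.pySetD g x (PySem.List.pySetD (PySem.List.pyGetD g x []) y "-")

-- number of '@' cells; used only as the totality fuel bound of both ports
def pvAt (g : List (List String)) : Nat := (g.map (fun row => row.count "@")).sum

-- one Python return statement: four sequential recursive calls (threading the mutated
-- grid left to right, as Python's evaluation order does), result 1 + c1 + c2 + c3 + c4
def pvSeq4 (f : List (List String) → Int → Int → List (List String) × Int)
    (g : List (List String)) (a1 b1 a2 b2 a3 b3 a4 b4 : Int) : List (List String) × Int :=
  let p1 := f g a1 b1
  let p2 := f p1.1 a2 b2
  let p3 := f p2.1 a3 b3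
  let p4 := f p3.1 a4 b4
  (p4.1, 1 + p1.2 + p2.2 + p3.2 + p4.2)

-- transliteration of A: the nine branches in Python's order; fuel is only a totality guard
def pvAuxA (fuel : Nat) (g : List (List String)) (x y : Int) : List (List String) × Int :=
  match fuel with
  | 0 => (g, 0)
  | fuel + 1 =>
    if pvCellGet g x y = "@" then
      let g0 := pvCellSet g x y
      if x = 0 ∧ y = 0 then pvSeq4 (pvAuxA fuel) g0 x 9 x (y+1) 9 y (x+1) y
      else if x = 0 ∧ y = 9 then pvSeq4 (pvAuxA fuel) g0 x (y-1) x 0 9 y (x+1) y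
      else if x = 9 ∧ y = 0 then pvSeq4 (pvAuxA fuel) g0 x 9 x (y+1) (x-1) y 0 y
      else if x = 9 ∧ y = 9 then pvSeq4 (pvAuxA fuel) g0 x (y-1) x 0 (x-1) y 0 y
      else if x = 0 ∧ y ≠ 0 ∧ y ≠ 9 then pvSeq4 (pvAuxA fuel) g0 x (y-1) x (y+1) 9 y (x+1) y
      else if x = 9 ∧ y ≠ 0 ∧ y ≠ 9 then pvSeq4 (pvAuxA fuel) g0 x (y-1) x (y+1) (x-1) y 0 y
      else if y = 0 ∧ x ≠ 0 ∧ x ≠ 9 then pvSeq4 (pvAuxA fuel) g0 x 9 x (y+1) (x-1) y (x+1) y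
      else if y = 9 ∧ x ≠ 0 ∧ x ≠ 9 then pvSeq4 (pvAuxA fuel) g0 x (y-1) x 0 (x-1) y (x+1) y
      else pvSeq4 (pvAuxA fuel) g0 x (y-1) x (y+1) (x-1) y (x+1) y
    else (g, 0)

def getFourCoord (fileVar : List (List String)) (x : Int) (y : Int) : Int :=
  (pvAuxA (pvAt fileVar + 1) fileVar x y).2

-- ===== PORT B =====
-- transliteration of B: stack with top at the list head (= the end of the Python list,
-- where Source B pushes and pops); fuel is only a totality guard
def pvAuxB (fuel : Nat) (g : List (List String)) (stack : List (Int × Int)) (acc : Int) : Int :=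
  match fuel with
  | 0 => acc
  | fuel + 1 =>
    match stack with
    | [] => acc
    | (cx, cy) :: rest =>
      if pvCellGet g cx cy = "@" then
        pvAuxB fuel (pvCellSet g cx cy)
          ((cx, PySem.Int.mod (cy - 1) 10) :: (cx, PySem.Int.mod (cy + 1) 10) ::
           (PySem.Int.mod (cx - 1) 10, cy) :: (PySem.Int.mod (cx + 1) 10, cy) :: rest)
          (acc + 1)
      else pvAuxB fuel g rest acc

def getFourCoord_alt (fileVar : List (List String)) (x : Int) (y : Int) : Int :=
  pvAuxB (5 * pvAt fileVar + 2) fileVar [(x, y)] 0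

-- ===== PRECONDITION & SPEC =====
-- the start cell fileVar[x][y] under Python indexing (none = IndexError)
def pvStart? (fileVar : List (List String)) (x y : Int) : Option String :=
  (PySem.List.pyGet? fileVar x).bind (fun row => PySem.List.pyGet? row y)

-- Pre_ admits the function's natural domain — a 10×10 grid with 0 ≤ x,y < 10 — plus every
-- input whose start cell exists but is not '@' (both programs return 0 at once); it excludes
-- only '@'-starts outside that 10×10 torus, where A's hardcoded 0/9 wraparound mixes with
-- accidental Python negative indexing or raises IndexError.
def Pre_getFourCoord (fileVar : List (List String)) (x : Int) (y : Int) : Prop :=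
  (fileVar.length = 10 ∧ (∀ row ∈ fileVar, row.length = 10) ∧ 0 ≤ x ∧ x < 10 ∧ 0 ≤ y ∧ y < 10)
  ∨ (pvStart? fileVar x y ≠ none ∧ pvStart? fileVar x y ≠ some "@")
instance (fileVar : List (List String)) (x : Int) (y : Int) : Decidable (Pre_getFourCoord fileVar x y) := by unfold Pre_getFourCoord; infer_instance

def pvWitness_getFourCoord : List (List String) × Int × Int :=
  (List.replicate 10 (List.replicate 10 "@"), 0, 0)

def Spec_getFourCoord (fileVar : List (List String)) (x : Int) (y : Int) (out : Int) : Prop := out = getFourCoord_alt fileVar x y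
instance (fileVar : List (List String)) (x : Int) (y : Int) (out : Int) : Decidable (Spec_getFourCoord fileVar x y out) := by unfold Spec_getFourCoord; infer_instance

-- ===== CLAIM (what is proved, stated in full; the proofs are below) =====
def Claim_equal_getFourCoord : Prop := ∀ (fileVar : List (List String)) (x : Int) (y : Int), Dom_getFourCoord fileVar x y → Pre_getFourCoord fileVar x y → Spec_getFourCoord fileVar x y (getFourCoord fileVar x y)

-- ===== LEMMAS AND PROOFS =====

-- coordinates on the torus
def pvInR (x y : Int) : Prop := 0 ≤ x ∧ x < 10 ∧ 0 ≤ y ∧ y < 10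

lemma pvInR_mod_left (x y : Int) (h : pvInR x y) (a : Int) :
    pvInR (PySem.Int.mod a 10) y :=
  ⟨PySem.Int.mod_nonneg _ (by norm_num), PySem.Int.mod_lt _ (by norm_num), h.2.2.1, h.2.2.2⟩

lemma pvInR_mod_right (x y : Int) (h : pvInR x y) (a : Int) :
    pvInR x (PySem.Int.mod a 10) :=
  ⟨h.1, h.2.1, PySem.Int.mod_nonneg _ (by norm_num), PySem.Int.mod_lt _ (by norm_num)⟩

-- pyGetD at a nonnegative index is List.getD
lemma pvGetD_nonneg {α : Type} (xs : List α) (i : Int) (d : α) (h : 0 ≤ i) :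
    PySem.List.pyGetD xs i d = xs.getD i.toNat d := by
  simp [PySem.List.pyGetD, PySem.List.pyGet?_of_nonneg xs h, List.getD]

-- row-level counting
lemma pvCount_set_le (row : List String) (j : Nat) :
    ((row.set j "-").count "@") ≤ row.count "@" := by
  induction row generalizing j with
  | nil => simp
  | cons r rs ih =>
    cases j with
    | zero => simp [List.count_cons]
    | succ j => simpa [List.count_cons] using ih j

lemma pvCount_set_lt (row : List String) (j : Nat) (h : row.getD j "" = "@") :
    ((row.set j "-").count "@") < row.count "@" := by
  induction row generalizing j with
  | nil => simp at h
  | cons r rs ih =>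
    cases j with
    | zero =>
      simp_all
    | succ j =>
      have := ih j (by simpa using h)
      simp [List.count_cons]
      omega

lemma pvAt_cons (r : List String) (g : List (List String)) :
    pvAt (r :: g) = r.count "@" + pvAt g := by simp [pvAt]

-- grid-level counting (Nat indices)
lemma pvAt_cs_le (g : List (List String)) (i j : Nat) :
    pvAt (g.set i ((g.getD i []).set j "-")) ≤ pvAt g := by
  induction g generalizing i with
  | nil => simp
  | cons r rs ih =>
    cases i with
    | zero =>
      simp only [List.getD_cons_zero, List.set_cons_zero, pvAt_cons]
      have := pvCount_set_le r j; omega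
    | succ i =>
      simp only [List.getD_cons_succ, List.set_cons_succ, pvAt_cons]
      have := ih i; omega

lemma pvAt_cs_lt (g : List (List String)) (i j : Nat)
    (h : (g.getD i []).getD j "" = "@") :
    pvAt (g.set i ((g.getD i []).set j "-")) < pvAt g := by
  induction g generalizing i with
  | nil => simp at h
  | cons r rs ih =>
    cases i with
    | zero =>
      simp only [List.getD_cons_zero] at h
      simp only [List.getD_cons_zero, List.set_cons_zero, pvAt_cons]
      have := pvCount_set_lt r j h; omega
    | succ i =>
      simp only [List.getD_cons_succ] at h
      simp only [List.getD_cons_succ, List.set_cons_succ, pvAt_cons]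
      have := ih i h; omega

-- bridge the Int-level cell operations to the Nat-level ones
lemma pvCellSet_eq (g : List (List String)) (x y : Int) (hx : 0 ≤ x) (hy : 0 ≤ y) :
    pvCellSet g x y = g.set x.toNat ((g.getD x.toNat []).set y.toNat "-") := by
  simp [pvCellSet, PySem.List.pySetD_of_nonneg _ _ hx, PySem.List.pySetD_of_nonneg _ _ hy,
    pvGetD_nonneg _ _ _ hx]

lemma pvCellGet_eq (g : List (List String)) (x y : Int) (hx : 0 ≤ x) (hy : 0 ≤ y) :
    pvCellGet g x y = (g.getD x.toNat []).getD y.toNat "" := by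
  simp [pvCellGet, pvGetD_nonneg _ _ _ hx, pvGetD_nonneg _ _ _ hy]

lemma pvAt_cellSet_le (g : List (List String)) (x y : Int) (hx : 0 ≤ x) (hy : 0 ≤ y) :
    pvAt (pvCellSet g x y) ≤ pvAt g := by
  rw [pvCellSet_eq g x y hx hy]; exact pvAt_cs_le g _ _

lemma pvAt_cellSet_lt (g : List (List String)) (x y : Int) (hx : 0 ≤ x) (hy : 0 ≤ y)
    (h : pvCellGet g x y = "@") :
    pvAt (pvCellSet g x y) < pvAt g := by
  rw [pvCellSet_eq g x y hx hy]
  exact pvAt_cs_lt g _ _ (by rwa [pvCellGet_eq g x y hx hy] at h)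

lemma pvAt_pos (g : List (List String)) (x y : Int) (hx : 0 ≤ x) (hy : 0 ≤ y)
    (h : pvCellGet g x y = "@") : 0 < pvAt g :=
  Nat.pos_of_ne_zero (fun h0 => by
    have := pvAt_cellSet_lt g x y hx hy h; omega)

-- A's nine branches collapse, for in-range coordinates, to the uniform %10 neighbour step
lemma pvAuxA_step (fa : Nat) (g : List (List String)) (x y : Int) (h : pvInR x y) :
    pvAuxA (fa + 1) g x y =
      if pvCellGet g x y = "@" then
        pvSeq4 (pvAuxA fa) (pvCellSet g x y)
          x (PySem.Int.mod (y - 1) 10) x (PySem.Int.mod (y + 1) 10)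
          (PySem.Int.mod (x - 1) 10) y (PySem.Int.mod (x + 1) 10) y
      else (g, 0) := by
  obtain ⟨hx0, hx9, hy0, hy9⟩ := h
  have m1 : PySem.Int.mod (y - 1) 10 = if y = 0 then 9 else y - 1 := by
    rw [PySem.Int.mod_eq_emod_of_pos (by norm_num)]; split_ifs <;> omega
  have m2 : PySem.Int.mod (y + 1) 10 = if y = 9 then 0 else y + 1 := by
    rw [PySem.Int.mod_eq_emod_of_pos (by norm_num)]; split_ifs <;> omega
  have m3 : PySem.Int.mod (x - 1) 10 = if x = 0 then 9 else x - 1 := by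
    rw [PySem.Int.mod_eq_emod_of_pos (by norm_num)]; split_ifs <;> omega
  have m4 : PySem.Int.mod (x + 1) 10 = if x = 9 then 0 else x + 1 := by
    rw [PySem.Int.mod_eq_emod_of_pos (by norm_num)]; split_ifs <;> omega
  rw [m1, m2, m3, m4]
  show (if pvCellGet g x y = "@" then _ else _) = _
  by_cases hc : pvCellGet g x y = "@" <;> simp only [hc, if_pos, if_false]
  all_goals split_ifs <;> first | rfl | (exfalso; omega)

-- the grid component of A never gains '@' cells
lemma pvAuxA_mono (fa : Nat) : ∀ (g : List (List String)) (x y : Int), pvInR x y →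
    pvAt (pvAuxA fa g x y).1 ≤ pvAt g := by
  induction fa with
  | zero => intro g x y h; simp [pvAuxA]
  | succ fa ih =>
    intro g x y h
    rw [pvAuxA_step fa g x y h]
    by_cases hc : pvCellGet g x y = "@"
    · simp only [hc, if_true]
      dsimp only [pvSeq4]
      have hg0 : pvAt (pvCellSet g x y) ≤ pvAt g := pvAt_cellSet_le g x y h.1 h.2.2.1
      have h1 := ih (pvCellSet g x y) x (PySem.Int.mod (y-1) 10) (pvInR_mod_right x y h (y-1))
      have h2 := ih (pvAuxA fa (pvCellSet g x y) x (PySem.Int.mod (y-1) 10)).1 x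
        (PySem.Int.mod (y+1) 10) (pvInR_mod_right x y h (y+1))
      have h3 := ih (pvAuxA fa (pvAuxA fa (pvCellSet g x y) x (PySem.Int.mod (y-1) 10)).1 x
        (PySem.Int.mod (y+1) 10)).1 (PySem.Int.mod (x-1) 10) y (pvInR_mod_left x y h (x-1))
      have h4 := ih (pvAuxA fa (pvAuxA fa (pvAuxA fa (pvCellSet g x y) x (PySem.Int.mod (y-1) 10)).1 x
        (PySem.Int.mod (y+1) 10)).1 (PySem.Int.mod (x-1) 10) y).1 (PySem.Int.mod (x+1) 10) y
        (pvInR_mod_left x y h (x+1))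
      omega
    · simp [hc]

-- the result of A does not depend on the fuel, once the fuel exceeds the '@' count
lemma pvAuxA_irrel (n : Nat) : ∀ (g : List (List String)) (x y : Int) (fa fb : Nat),
    pvAt g ≤ n → pvInR x y → pvAt g < fa → pvAt g < fb →
    pvAuxA fa g x y = pvAuxA fb g x y := by
  induction n with
  | zero =>
    intro g x y fa fb hn h hfa hfb
    cases fa with
    | zero => omega
    | succ fa =>
      cases fb with
      | zero => omega
      | succ fb =>
        rw [pvAuxA_step fa g x y h, pvAuxA_step fb g x y h]
        by_cases hc : pvCellGet g x y = "@"
        · exact absurd (pvAt_pos g x y h.1 h.2.2.1 hc) (by omega)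
        · simp [hc]
  | succ n ih =>
    intro g x y fa fb hn h hfa hfb
    cases fa with
    | zero => omega
    | succ fa =>
      cases fb with
      | zero => omega
      | succ fb =>
        rw [pvAuxA_step fa g x y h, pvAuxA_step fb g x y h]
        by_cases hc : pvCellGet g x y = "@"
        · simp only [hc, if_true]
          dsimp only [pvSeq4]
          have hlt : pvAt (pvCellSet g x y) < pvAt g := pvAt_cellSet_lt g x y h.1 h.2.2.1 hc
          have e1 : pvAuxA fa (pvCellSet g x y) x (PySem.Int.mod (y-1) 10)
              = pvAuxA fb (pvCellSet g x y) x (PySem.Int.mod (y-1) 10) :=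
            ih _ _ _ _ _ (by omega) (pvInR_mod_right x y h (y-1)) (by omega) (by omega)
          rw [e1]
          have hm1 : pvAt (pvAuxA fb (pvCellSet g x y) x (PySem.Int.mod (y-1) 10)).1
              ≤ pvAt (pvCellSet g x y) :=
            pvAuxA_mono fb _ _ _ (pvInR_mod_right x y h (y-1))
          have e2 : pvAuxA fa (pvAuxA fb (pvCellSet g x y) x (PySem.Int.mod (y-1) 10)).1 x
                (PySem.Int.mod (y+1) 10)
              = pvAuxA fb (pvAuxA fb (pvCellSet g x y) x (PySem.Int.mod (y-1) 10)).1 x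
                (PySem.Int.mod (y+1) 10) :=
            ih _ _ _ _ _ (by omega) (pvInR_mod_right x y h (y+1)) (by omega) (by omega)
          rw [e2]
          have hm2 : pvAt (pvAuxA fb (pvAuxA fb (pvCellSet g x y) x (PySem.Int.mod (y-1) 10)).1 x
              (PySem.Int.mod (y+1) 10)).1 ≤ _ :=
            pvAuxA_mono fb (pvAuxA fb (pvCellSet g x y) x (PySem.Int.mod (y-1) 10)).1 x
              (PySem.Int.mod (y+1) 10) (pvInR_mod_right x y h (y+1))
          have e3 : pvAuxA fa (pvAuxA fb (pvAuxA fb (pvCellSet g x y) x (PySem.Int.mod (y-1) 10)).1 x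
                (PySem.Int.mod (y+1) 10)).1 (PySem.Int.mod (x-1) 10) y
              = pvAuxA fb (pvAuxA fb (pvAuxA fb (pvCellSet g x y) x (PySem.Int.mod (y-1) 10)).1 x
                (PySem.Int.mod (y+1) 10)).1 (PySem.Int.mod (x-1) 10) y :=
            ih _ _ _ _ _ (by omega) (pvInR_mod_left x y h (x-1)) (by omega) (by omega)
          rw [e3]
          have hm3 : pvAt (pvAuxA fb (pvAuxA fb (pvAuxA fb (pvCellSet g x y) x
              (PySem.Int.mod (y-1) 10)).1 x (PySem.Int.mod (y+1) 10)).1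
              (PySem.Int.mod (x-1) 10) y).1 ≤ _ :=
            pvAuxA_mono fb (pvAuxA fb (pvAuxA fb (pvCellSet g x y) x (PySem.Int.mod (y-1) 10)).1 x
              (PySem.Int.mod (y+1) 10)).1 (PySem.Int.mod (x-1) 10) y (pvInR_mod_left x y h (x-1))
          have e4 : pvAuxA fa (pvAuxA fb (pvAuxA fb (pvAuxA fb (pvCellSet g x y) x
                (PySem.Int.mod (y-1) 10)).1 x (PySem.Int.mod (y+1) 10)).1
                (PySem.Int.mod (x-1) 10) y).1 (PySem.Int.mod (x+1) 10) y
              = pvAuxA fb (pvAuxA fb (pvAuxA fb (pvAuxA fb (pvCellSet g x y) x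
                (PySem.Int.mod (y-1) 10)).1 x (PySem.Int.mod (y+1) 10)).1
                (PySem.Int.mod (x-1) 10) y).1 (PySem.Int.mod (x+1) 10) y :=
            ih _ _ _ _ _ (by omega) (pvInR_mod_left x y h (x+1)) (by omega) (by omega)
          rw [e4]
        · simp [hc]

-- the fuel-independent ("semantic") form of A
def pvAsem (g : List (List String)) (x y : Int) : List (List String) × Int :=
  pvAuxA (pvAt g + 1) g x y

lemma pvAsem_mono (g : List (List String)) (x y : Int) (h : pvInR x y) :
    pvAt (pvAsem g x y).1 ≤ pvAt g := pvAuxA_mono _ g x y h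

lemma pvAuxA_eq_pvAsem (fa : Nat) (g : List (List String)) (x y : Int)
    (h : pvInR x y) (hfa : pvAt g < fa) : pvAuxA fa g x y = pvAsem g x y :=
  pvAuxA_irrel (pvAt g) g x y fa (pvAt g + 1) le_rfl h hfa (by omega)

lemma pvAsem_step (g : List (List String)) (x y : Int) (h : pvInR x y) :
    pvAsem g x y =
      if pvCellGet g x y = "@" then
        pvSeq4 pvAsem (pvCellSet g x y)
          x (PySem.Int.mod (y - 1) 10) x (PySem.Int.mod (y + 1) 10)
          (PySem.Int.mod (x - 1) 10) y (PySem.Int.mod (x + 1) 10) y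
      else (g, 0) := by
  show pvAuxA (pvAt g + 1) g x y = _
  rw [pvAuxA_step (pvAt g) g x y h]
  by_cases hc : pvCellGet g x y = "@"
  · simp only [hc, if_true]
    dsimp only [pvSeq4]
    have hlt : pvAt (pvCellSet g x y) < pvAt g := pvAt_cellSet_lt g x y h.1 h.2.2.1 hc
    have e1 : pvAuxA (pvAt g) (pvCellSet g x y) x (PySem.Int.mod (y-1) 10)
        = pvAsem (pvCellSet g x y) x (PySem.Int.mod (y-1) 10) :=
      pvAuxA_eq_pvAsem _ _ _ _ (pvInR_mod_right x y h (y-1)) (by omega)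
    rw [e1]
    have hm1 := pvAsem_mono (pvCellSet g x y) x (PySem.Int.mod (y-1) 10)
      (pvInR_mod_right x y h (y-1))
    have e2 : pvAuxA (pvAt g) (pvAsem (pvCellSet g x y) x (PySem.Int.mod (y-1) 10)).1 x
          (PySem.Int.mod (y+1) 10)
        = pvAsem (pvAsem (pvCellSet g x y) x (PySem.Int.mod (y-1) 10)).1 x
          (PySem.Int.mod (y+1) 10) :=
      pvAuxA_eq_pvAsem _ _ _ _ (pvInR_mod_right x y h (y+1)) (by omega)
    rw [e2]
    have hm2 := pvAsem_mono (pvAsem (pvCellSet g x y) x (PySem.Int.mod (y-1) 10)).1 x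
      (PySem.Int.mod (y+1) 10) (pvInR_mod_right x y h (y+1))
    have e3 : pvAuxA (pvAt g) (pvAsem (pvAsem (pvCellSet g x y) x (PySem.Int.mod (y-1) 10)).1 x
          (PySem.Int.mod (y+1) 10)).1 (PySem.Int.mod (x-1) 10) y
        = pvAsem (pvAsem (pvAsem (pvCellSet g x y) x (PySem.Int.mod (y-1) 10)).1 x
          (PySem.Int.mod (y+1) 10)).1 (PySem.Int.mod (x-1) 10) y :=
      pvAuxA_eq_pvAsem _ _ _ _ (pvInR_mod_left x y h (x-1)) (by omega)
    rw [e3]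
    have hm3 := pvAsem_mono (pvAsem (pvAsem (pvCellSet g x y) x (PySem.Int.mod (y-1) 10)).1 x
      (PySem.Int.mod (y+1) 10)).1 (PySem.Int.mod (x-1) 10) y (pvInR_mod_left x y h (x-1))
    have e4 : pvAuxA (pvAt g) (pvAsem (pvAsem (pvAsem (pvCellSet g x y) x
          (PySem.Int.mod (y-1) 10)).1 x (PySem.Int.mod (y+1) 10)).1
          (PySem.Int.mod (x-1) 10) y).1 (PySem.Int.mod (x+1) 10) y
        = pvAsem (pvAsem (pvAsem (pvAsem (pvCellSet g x y) x
          (PySem.Int.mod (y-1) 10)).1 x (PySem.Int.mod (y+1) 10)).1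
          (PySem.Int.mod (x-1) 10) y).1 (PySem.Int.mod (x+1) 10) y :=
      pvAuxA_eq_pvAsem _ _ _ _ (pvInR_mod_left x y h (x+1)) (by omega)
    rw [e4]
  · simp [hc]

-- the result of B does not depend on the fuel, once the fuel exceeds the loop measure
lemma pvAuxB_irrel (n : Nat) : ∀ (g : List (List String)) (stack : List (Int × Int)) (acc : Int)
    (fa fb : Nat), stack.length + 5 * pvAt g ≤ n → (∀ p ∈ stack, pvInR p.1 p.2) →
    stack.length + 5 * pvAt g < fa → stack.length + 5 * pvAt g < fb →
    pvAuxB fa g stack acc = pvAuxB fb g stack acc := by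
  induction n with
  | zero =>
    intro g stack acc fa fb hn hs hfa hfb
    cases fa with
    | zero => omega
    | succ fa =>
      cases fb with
      | zero => omega
      | succ fb =>
        cases stack with
        | nil => simp [pvAuxB]
        | cons p rest => simp at hn
  | succ n ih =>
    intro g stack acc fa fb hn hs hfa hfb
    cases fa with
    | zero => omega
    | succ fa =>
      cases fb with
      | zero => omega
      | succ fb =>
        cases stack with
        | nil => simp [pvAuxB]
        | cons p rest =>
          obtain ⟨px, py⟩ := p
          have hin : pvInR px py := hs (px, py) (by simp)
          simp only [pvAuxB]
          by_cases hc : pvCellGet g px py = "@"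
          · simp only [hc, if_true]
            have hlt : pvAt (pvCellSet g px py) < pvAt g :=
              pvAt_cellSet_lt g px py hin.1 hin.2.2.1 hc
            apply ih
            · simp at hn ⊢; omega
            · intro q hq
              simp only [List.mem_cons] at hq
              rcases hq with rfl | rfl | rfl | rfl | hq
              · exact pvInR_mod_right px py hin (py - 1)
              · exact pvInR_mod_right px py hin (py + 1)
              · exact pvInR_mod_left px py hin (px - 1)
              · exact pvInR_mod_left px py hin (px + 1)
              · exact hs q (by simp [hq])
            · simp at hfa ⊢; omega
            · simp at hfb ⊢; omega
          · simp only [hc, if_false]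
            apply ih
            · simp at hn ⊢; omega
            · exact fun q hq => hs q (by simp [hq])
            · simp at hfa ⊢; omega
            · simp at hfb ⊢; omega

-- the fuel-independent ("semantic") form of B
def pvBsem (g : List (List String)) (stack : List (Int × Int)) (acc : Int) : Int :=
  pvAuxB (stack.length + 5 * pvAt g + 1) g stack acc

lemma pvBsem_nil (g : List (List String)) (acc : Int) : pvBsem g [] acc = acc := rfl

lemma pvBsem_cons (g : List (List String)) (x y : Int) (rest : List (Int × Int)) (acc : Int)
    (h : pvInR x y) (hs : ∀ p ∈ rest, pvInR p.1 p.2) :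
    pvBsem g ((x, y) :: rest) acc =
      if pvCellGet g x y = "@" then
        pvBsem (pvCellSet g x y)
          ((x, PySem.Int.mod (y - 1) 10) :: (x, PySem.Int.mod (y + 1) 10) ::
           (PySem.Int.mod (x - 1) 10, y) :: (PySem.Int.mod (x + 1) 10, y) :: rest)
          (acc + 1)
      else pvBsem g rest acc := by
  show pvAuxB (((x, y) :: rest).length + 5 * pvAt g + 1) g ((x, y) :: rest) acc = _
  simp only [pvAuxB, List.length_cons]
  by_cases hc : pvCellGet g x y = "@"
  · simp only [hc, if_true]
    have hlt : pvAt (pvCellSet g x y) < pvAt g := pvAt_cellSet_lt g x y h.1 h.2.2.1 hc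
    apply pvAuxB_irrel (rest.length + 1 + 5 * pvAt g)
    · simp only [List.length_cons]; omega
    · intro q hq
      simp only [List.mem_cons] at hq
      rcases hq with rfl | rfl | rfl | rfl | hq
      · exact pvInR_mod_right x y h (y - 1)
      · exact pvInR_mod_right x y h (y + 1)
      · exact pvInR_mod_left x y h (x - 1)
      · exact pvInR_mod_left x y h (x + 1)
      · exact hs q hq
    · simp only [List.length_cons]; omega
    · simp only [List.length_cons]; omega
  · simp only [hc, if_false]
    apply pvAuxB_irrel (rest.length + 1 + 5 * pvAt g)
    · omega
    · exact hs
    · omega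
    · omega

-- the defunctionalization bridge: popping (x, y) is exactly running A at (x, y)
lemma pvBridge (n : Nat) : ∀ (g : List (List String)) (x y : Int) (rest : List (Int × Int))
    (acc : Int), pvAt g ≤ n → pvInR x y → (∀ p ∈ rest, pvInR p.1 p.2) →
    pvBsem g ((x, y) :: rest) acc = pvBsem (pvAsem g x y).1 rest (acc + (pvAsem g x y).2) := by
  induction n with
  | zero =>
    intro g x y rest acc hn h hs
    rw [pvBsem_cons g x y rest acc h hs, pvAsem_step g x y h]
    by_cases hc : pvCellGet g x y = "@"
    · exact absurd (pvAt_pos g x y h.1 h.2.2.1 hc) (by omega)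
    · simp [hc]
  | succ n ih =>
    intro g x y rest acc hn h hs
    rw [pvBsem_cons g x y rest acc h hs, pvAsem_step g x y h]
    by_cases hc : pvCellGet g x y = "@"
    · simp only [hc, if_true]
      dsimp only [pvSeq4]
      have hlt : pvAt (pvCellSet g x y) < pvAt g := pvAt_cellSet_lt g x y h.1 h.2.2.1 hc
      have hs2 : ∀ p ∈ ((x, PySem.Int.mod (y + 1) 10) ::
          (PySem.Int.mod (x - 1) 10, y) :: (PySem.Int.mod (x + 1) 10, y) :: rest),
          pvInR p.1 p.2 := by
        intro q hq
        simp only [List.mem_cons] at hq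
        rcases hq with rfl | rfl | rfl | hq
        · exact pvInR_mod_right x y h (y + 1)
        · exact pvInR_mod_left x y h (x - 1)
        · exact pvInR_mod_left x y h (x + 1)
        · exact hs q hq
      rw [ih (pvCellSet g x y) x (PySem.Int.mod (y - 1) 10) _ _ (by omega)
        (pvInR_mod_right x y h (y - 1)) hs2]
      have hm1 := pvAsem_mono (pvCellSet g x y) x (PySem.Int.mod (y - 1) 10)
        (pvInR_mod_right x y h (y - 1))
      rw [ih _ x (PySem.Int.mod (y + 1) 10) _ _ (by omega)
        (pvInR_mod_right x y h (y + 1)) (fun q hq => hs2 q (by simp [List.mem_cons] at hq ⊢; tauto))]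
      have hm2 := pvAsem_mono (pvAsem (pvCellSet g x y) x (PySem.Int.mod (y - 1) 10)).1 x
        (PySem.Int.mod (y + 1) 10) (pvInR_mod_right x y h (y + 1))
      rw [ih _ (PySem.Int.mod (x - 1) 10) y _ _ (by omega)
        (pvInR_mod_left x y h (x - 1)) (fun q hq => hs2 q (by simp [List.mem_cons] at hq ⊢; tauto))]
      have hm3 := pvAsem_mono (pvAsem (pvAsem (pvCellSet g x y) x
        (PySem.Int.mod (y - 1) 10)).1 x (PySem.Int.mod (y + 1) 10)).1
        (PySem.Int.mod (x - 1) 10) y (pvInR_mod_left x y h (x - 1))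
      rw [ih _ (PySem.Int.mod (x + 1) 10) y _ _ (by omega)
        (pvInR_mod_left x y h (x + 1)) hs]
      congr 1
      ring
    · simp [hc]

-- ===== VERDICT (by name: the statement is the Claim_ definition above) =====
theorem getFourCoord_spec : Claim_equal_getFourCoord := by
  intro fileVar x y _hDom hPre
  show getFourCoord fileVar x y = getFourCoord_alt fileVar x y
  rcases hPre with ⟨-, -, hx0, hx9, hy0, hy9⟩ | ⟨hsome, hnat⟩
  case inr =>
    obtain ⟨row, hrow, c, hcc, hcne⟩ : ∃ row, PySem.List.pyGet? fileVar x = some row ∧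
        ∃ c, PySem.List.pyGet? row y = some c ∧ c ≠ "@" := by
      cases hr : PySem.List.pyGet? fileVar x with
      | none => simp [pvStart?, hr] at hsome
      | some row =>
        cases hcg : PySem.List.pyGet? row y with
        | none => simp [pvStart?, hr, hcg] at hsome
        | some c => exact ⟨row, rfl, c, hcg, by simpa [pvStart?, hr, hcg] using hnat⟩
    have hcell : pvCellGet fileVar x y ≠ "@" := by
      simpa [pvCellGet, PySem.List.pyGetD, hrow, hcc] using hcne
    have hA : getFourCoord fileVar x y = 0 := by
      show (pvAuxA (pvAt fileVar + 1) fileVar x y).2 = 0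
      simp [pvAuxA, hcell]
    have hB : getFourCoord_alt fileVar x y = 0 := by
      show pvAuxB (5 * pvAt fileVar + 2) fileVar [(x, y)] 0 = 0
      have h2 : 5 * pvAt fileVar + 2 = (5 * pvAt fileVar + 1) + 1 := by omega
      rw [h2]
      simp [pvAuxB, hcell]
    rw [hA, hB]
  have hIn : pvInR x y := ⟨hx0, hx9, hy0, hy9⟩
  have hB : getFourCoord_alt fileVar x y = pvBsem fileVar [(x, y)] 0 := by
    show pvAuxB (5 * pvAt fileVar + 2) fileVar [(x, y)] 0
        = pvAuxB ([(x, y)].length + 5 * pvAt fileVar + 1) fileVar [(x, y)] 0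
    congr 1
    simp
    omega
  have hA : getFourCoord fileVar x y = (pvAsem fileVar x y).2 := rfl
  rw [hA, hB, pvBridge (pvAt fileVar) fileVar x y [] 0 le_rfl hIn (by simp), pvBsem_nil]
  omega
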